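-- pv_equiv track=rewrite | github.com/voidwyrm-2/CatScript | interpreter.py | get_char_not_in_str
-- ===== SOURCE A (Python) =====
-- def get_char_not_in_str(string: str, char: str, quote_char: str = '"', nth_char_to_get: int = 1, respect_escapes: bool = True) -> int:
--     '''Returns the index of `char` in the given string
--     Returns `-1` if the char is not found'''
--     if char not in string: return -1
--     in_str = False
--     ignore_quote = 0
--     char_count = 0 if nth_char_to_get - 1 < 0 else nth_char_to_get - 1
--     for cn, c in enumerate(string):
--         if c == quote_char and not ignore_quote:
--             in_str = not in_str
--         elif c == '\\' and respect_escapes and in_str: ignore_quote = 2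
--         elif c == char and not in_str:
--             if char_count: char_count -= 1
--             else: return cn
--         if ignore_quote: ignore_quote -= 1
--     return -1
-- ===== SOURCE B (Python) =====
-- def _find1(string, target, start):
--     # first index >= start of the single-character target; -1 if target is not one char or absent
--     if len(target) != 1:
--         return -1
--     return string.find(target, start)
--
-- def get_char_not_in_str(string: str, char: str, quote_char: str = '"', nth_char_to_get: int = 1, respect_escapes: bool = True) -> int:
--     '''Returns the index of `char` in the given string
--     Returns `-1` if the char is not found'''
--     # Segment-jumping scan: instead of a per-character quote/escape state machine,
--     # jump with str.find to the next relevant position.  Outside quotes, jump to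
--     # the earlier of the next `char` / next `quote_char`; on a quote, skip the
--     # whole quoted region by finding the closing quote, hopping over escaped
--     # quotes (a quote is escaped iff the preceding char is a backslash; escapes
--     # are inert when quote_char itself is a backslash).
--     n = nth_char_to_get - 1
--     if n < 0:
--         n = 0
--     esc = respect_escapes and quote_char != '\\'
--     i = 0
--     while True:
--         cpos = _find1(string, char, i)
--         qpos = _find1(string, quote_char, i)
--         if cpos != -1 and (qpos == -1 or cpos < qpos):
--             if n == 0:
--                 return cpos
--             n -= 1
--             i = cpos + 1
--         elif qpos != -1:
--             j = _find1(string, quote_char, qpos + 1)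
--             while j != -1 and esc and string[j - 1] == '\\':
--                 j = _find1(string, quote_char, j + 1)
--             if j == -1:
--                 return -1
--             i = j + 1
--         else:
--             return -1
-- ===== Notes on version B (the rewrite author's own statement) =====
-- stated objective: alternative
-- what changed: B replaces A's per-character in_str/ignore_quote state machine with a segment-jumping scanner: str.find jumps to the next char/quote occurrence outside quotes, and quoted regions are skipped wholesale by finding the closing quote and hopping over backslash-escaped quotes.
import Mathlib
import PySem

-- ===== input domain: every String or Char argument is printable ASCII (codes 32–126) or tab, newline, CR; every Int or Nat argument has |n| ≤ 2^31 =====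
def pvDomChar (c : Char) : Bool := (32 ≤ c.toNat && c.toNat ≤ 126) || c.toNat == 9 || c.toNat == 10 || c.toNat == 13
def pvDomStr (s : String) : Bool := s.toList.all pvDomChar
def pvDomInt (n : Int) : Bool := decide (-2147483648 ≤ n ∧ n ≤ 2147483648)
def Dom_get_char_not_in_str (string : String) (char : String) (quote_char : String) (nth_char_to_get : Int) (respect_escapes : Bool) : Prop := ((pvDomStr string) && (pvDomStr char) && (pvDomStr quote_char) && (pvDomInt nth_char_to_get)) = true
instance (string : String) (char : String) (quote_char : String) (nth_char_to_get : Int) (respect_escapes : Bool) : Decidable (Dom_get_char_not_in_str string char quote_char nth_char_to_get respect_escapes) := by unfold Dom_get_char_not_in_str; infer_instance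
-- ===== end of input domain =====

-- B replaces A's per-character in_str/ignore_quote state machine by a segment-jumping
-- scanner built on find: jump to the next char/quote occurrence outside quotes, and skip
-- quoted regions wholesale, hopping over backslash-escaped quotes.  (objective: alternative)

-- ===== PORT A =====
-- decrement at the bottom of A's loop: `if ignore_quote: ignore_quote -= 1`
def pvADec (iq : Int) : Int := if iq ≠ 0 then iq - 1 else iq

def pvALoop (charL quoteL : List Char) (resp : Bool) (cs : List Char) (cn : Int) (inStr : Bool) (iq cc : Int) : Int :=
  match cs with
  | [] => -1
  | c :: rest =>
    if [c] = quoteL ∧ iq = 0 then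
      pvALoop charL quoteL resp rest (cn + 1) (!inStr) (pvADec iq) cc
    else if c = '\\' ∧ resp = true ∧ inStr = true then
      pvALoop charL quoteL resp rest (cn + 1) inStr (pvADec 2) cc
    else if [c] = charL ∧ inStr = false then
      if cc ≠ 0 then pvALoop charL quoteL resp rest (cn + 1) inStr (pvADec iq) (cc - 1)
      else cn
    else
      pvALoop charL quoteL resp rest (cn + 1) inStr (pvADec iq) cc

def get_char_not_in_str (string : String) (char : String) (quote_char : String) (nth_char_to_get : Int) (respect_escapes : Bool) : Int :=
  if ¬ (PySem.Str.isIn char string = true) then -1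
  else
    let char_count : Int := if nth_char_to_get - 1 < 0 then 0 else nth_char_to_get - 1
    pvALoop char.toList quote_char.toList respect_escapes string.toList 0 false 0 char_count

-- ===== PORT B =====
-- Source B's _find1(string, target, start): first index ≥ start whose character equals the
-- single-character target (never matches a target that is not one char, as the guard does).
def pvFirstIdx (cs : List Char) (t : List Char) : Option Nat :=
  match cs with
  | [] => none
  | c :: rest => if [c] = t then some 0 else (pvFirstIdx rest t).map (· + 1)

def pvFind1 (cs : List Char) (t : List Char) (start : Nat) : Option Nat :=
  (pvFirstIdx (cs.drop start) t).map (start + ·)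

-- Source B's inner while loop: find the closing quote from `start`, skipping escaped quotes
-- (fuel only makes the recursion structural; it is ample for every call)
def pvCloseF (cs qtL : List Char) (esc : Bool) : Nat → Nat → Option Nat
  | 0, _ => none
  | fuel+1, start =>
    match pvFind1 cs qtL start with
    | none => none
    | some j =>
      if esc = true ∧ cs[j-1]? = some '\\' then pvCloseF cs qtL esc fuel (j+1) else some j

def pvClose (cs qtL : List Char) (esc : Bool) (start : Nat) : Option Nat :=
  pvCloseF cs qtL esc (cs.length + 1) start

-- Source B's outer while loop (fuel only makes the recursion structural; it is ample)
def pvBOuterF (cs chL qtL : List Char) (esc : Bool) : Nat → Nat → Int → Int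
  | 0, _, _ => -1
  | fuel+1, i, n =>
    match pvFind1 cs chL i, pvFind1 cs qtL i with
    | some cj, none =>
        if n = 0 then (cj : Int) else pvBOuterF cs chL qtL esc fuel (cj + 1) (n - 1)
    | some cj, some qj =>
        if cj < qj then
          (if n = 0 then (cj : Int) else pvBOuterF cs chL qtL esc fuel (cj + 1) (n - 1))
        else
          match pvClose cs qtL esc (qj + 1) with
          | none => -1
          | some k => pvBOuterF cs chL qtL esc fuel (k + 1) n
    | none, some qj =>
        match pvClose cs qtL esc (qj + 1) with
        | none => -1
        | some k => pvBOuterF cs chL qtL esc fuel (k + 1) n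
    | none, none => -1

def pvBOuter (cs chL qtL : List Char) (esc : Bool) (i : Nat) (n : Int) : Int :=
  pvBOuterF cs chL qtL esc (cs.length + 1 + 1) i n

def get_char_not_in_str_alt (string : String) (char : String) (quote_char : String) (nth_char_to_get : Int) (respect_escapes : Bool) : Int :=
  let n : Int := if nth_char_to_get - 1 < 0 then 0 else nth_char_to_get - 1
  -- Source B: esc = respect_escapes and quote_char != '\\'  (string comparison, via toList)
  let esc : Bool := respect_escapes && decide (quote_char.toList ≠ ['\\'])
  pvBOuter string.toList char.toList quote_char.toList esc 0 n

-- ===== PRECONDITION & SPEC =====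
def Spec_get_char_not_in_str (string : String) (char : String) (quote_char : String) (nth_char_to_get : Int) (respect_escapes : Bool) (out : Int) : Prop := out = get_char_not_in_str_alt string char quote_char nth_char_to_get respect_escapes
instance (string : String) (char : String) (quote_char : String) (nth_char_to_get : Int) (respect_escapes : Bool) (out : Int) : Decidable (Spec_get_char_not_in_str string char quote_char nth_char_to_get respect_escapes out) := by unfold Spec_get_char_not_in_str; infer_instance

-- ===== CLAIM (what is proved, stated in full; the proofs are below) =====
def Claim_equal_get_char_not_in_str : Prop := ∀ (string : String) (char : String) (quote_char : String) (nth_char_to_get : Int) (respect_escapes : Bool), Dom_get_char_not_in_str string char quote_char nth_char_to_get respect_escapes → Spec_get_char_not_in_str string char quote_char nth_char_to_get respect_escapes (get_char_not_in_str string char quote_char nth_char_to_get respect_escapes)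

-- ===== LEMMAS AND PROOFS =====

-- bounds of pvFind1 and pvClose
theorem pvFirstIdx_lt_aux (t : List Char) : ∀ (cs : List Char) (k : Nat), pvFirstIdx cs t = some k → k < cs.length := by
  intro cs
  induction cs with
  | nil => intro k h; simp [pvFirstIdx] at h
  | cons c rest ih =>
    intro k h
    simp only [pvFirstIdx] at h
    split at h
    · simp at h ⊢; omega
    · simp only [Option.map_eq_some_iff] at h
      obtain ⟨a, ha, hk⟩ := h
      have := ih a ha
      simp; omega

theorem pvFind1_bounds (cs t : List Char) (start j : Nat) (h : pvFind1 cs t start = some j) :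
    start ≤ j ∧ j < cs.length := by
  simp only [pvFind1, Option.map_eq_some_iff] at h
  obtain ⟨a, ha, hj⟩ := h
  have := pvFirstIdx_lt_aux t _ _ ha
  simp at this
  omega

theorem pvCloseF_bounds (cs qtL : List Char) (esc : Bool) : ∀ (f s j : Nat),
    pvCloseF cs qtL esc f s = some j → s ≤ j ∧ j < cs.length := by
  intro f
  induction f with
  | zero => intro s j h; simp [pvCloseF] at h
  | succ f ih =>
    intro s j h
    simp only [pvCloseF] at h
    rcases hf : pvFind1 cs qtL s with _ | k
    · simp [hf] at h
    · simp only [hf] at h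
      have hb := pvFind1_bounds cs qtL s k hf
      split at h
      · have := ih (k+1) j h; omega
      · simp at h; omega

theorem pvClose_bounds (cs qtL : List Char) (esc : Bool) (start j : Nat)
    (h : pvClose cs qtL esc start = some j) : start ≤ j ∧ j < cs.length :=
  pvCloseF_bounds cs qtL esc _ start j h

-- the result of pvCloseF does not depend on the fuel, as long as it is ample
theorem pvCloseF_fuel (cs qtL : List Char) (esc : Bool) : ∀ (f1 f2 s : Nat),
    cs.length - s < f1 → cs.length - s < f2 →
    pvCloseF cs qtL esc f1 s = pvCloseF cs qtL esc f2 s := by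
  intro f1
  induction f1 with
  | zero => intro f2 s h1 h2; omega
  | succ f1 ih =>
    intro f2 s h1 h2
    cases f2 with
    | zero => omega
    | succ f2 =>
      simp only [pvCloseF]
      rcases hf : pvFind1 cs qtL s with _ | j <;> simp only [hf]
      · have hb := pvFind1_bounds cs qtL s j hf
        split_ifs with he
        · exact ih f2 (j+1) (by omega) (by omega)
        · rfl

-- the result of pvBOuterF does not depend on the fuel, as long as it is ample
theorem pvBOuterF_fuel (cs chL qtL : List Char) (esc : Bool) : ∀ (f1 f2 i : Nat) (n : Int),
    cs.length + 1 - i < f1 → cs.length + 1 - i < f2 →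
    pvBOuterF cs chL qtL esc f1 i n = pvBOuterF cs chL qtL esc f2 i n := by
  intro f1
  induction f1 with
  | zero => intro f2 i n h1 h2; omega
  | succ f1 ih =>
    intro f2 i n h1 h2
    cases f2 with
    | zero => omega
    | succ f2 =>
      simp only [pvBOuterF]
      rcases hfc : pvFind1 cs chL i with _ | cj <;> rcases hfq : pvFind1 cs qtL i with _ | qj <;>
        simp only [hfc, hfq]
      · rcases hcl : pvClose cs qtL esc (qj+1) with _ | k <;> simp only [hcl]
        · have hb1 := pvFind1_bounds cs qtL i qj hfq
          have hb2 := pvClose_bounds cs qtL esc (qj+1) k hcl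
          exact ih f2 (k+1) n (by omega) (by omega)
      · have hb := pvFind1_bounds cs chL i cj hfc
        split_ifs with h0
        · rfl
        · exact ih f2 (cj+1) (n-1) (by omega) (by omega)
      · have hbc := pvFind1_bounds cs chL i cj hfc
        have hbq := pvFind1_bounds cs qtL i qj hfq
        split_ifs with hlt h0
        · rfl
        · exact ih f2 (cj+1) (n-1) (by omega) (by omega)
        · rcases hcl : pvClose cs qtL esc (qj+1) with _ | k <;> simp only [hcl]
          · have hb2 := pvClose_bounds cs qtL esc (qj+1) k hcl
            exact ih f2 (k+1) n (by omega) (by omega)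

-- one-step unfolding of pvBOuter in terms of itself
theorem pvBOuter_unfold (cs chL qtL : List Char) (esc : Bool) (i : Nat) (n : Int) :
    pvBOuter cs chL qtL esc i n =
      (match pvFind1 cs chL i, pvFind1 cs qtL i with
       | some cj, none =>
           if n = 0 then (cj : Int) else pvBOuter cs chL qtL esc (cj + 1) (n - 1)
       | some cj, some qj =>
           if cj < qj then
             (if n = 0 then (cj : Int) else pvBOuter cs chL qtL esc (cj + 1) (n - 1))
           else
             (match pvClose cs qtL esc (qj + 1) with
              | none => -1
              | some k => pvBOuter cs chL qtL esc (k + 1) n)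
       | none, some qj =>
           (match pvClose cs qtL esc (qj + 1) with
            | none => -1
            | some k => pvBOuter cs chL qtL esc (k + 1) n)
       | none, none => -1) := by
  conv_lhs => rw [pvBOuter, pvBOuterF]
  rcases hfc : pvFind1 cs chL i with _ | cj <;> rcases hfq : pvFind1 cs qtL i with _ | qj <;>
    simp only [hfc, hfq]
  · rcases hcl : pvClose cs qtL esc (qj+1) with _ | k <;> simp only [hcl]
    · have hb1 := pvFind1_bounds cs qtL i qj hfq
      have hb2 := pvClose_bounds cs qtL esc (qj+1) k hcl
      exact pvBOuterF_fuel cs chL qtL esc (cs.length + 1) (cs.length + 1 + 1) (k+1) n (by omega) (by omega)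
  · have hb := pvFind1_bounds cs chL i cj hfc
    split_ifs with h0
    · rfl
    · exact pvBOuterF_fuel cs chL qtL esc (cs.length + 1) (cs.length + 1 + 1) (cj+1) (n-1) (by omega) (by omega)
  · have hbc := pvFind1_bounds cs chL i cj hfc
    have hbq := pvFind1_bounds cs qtL i qj hfq
    split_ifs with hlt h0
    · rfl
    · exact pvBOuterF_fuel cs chL qtL esc (cs.length + 1) (cs.length + 1 + 1) (cj+1) (n-1) (by omega) (by omega)
    · rcases hcl : pvClose cs qtL esc (qj+1) with _ | k <;> simp only [hcl]
      · have hb2 := pvClose_bounds cs qtL esc (qj+1) k hcl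
        exact pvBOuterF_fuel cs chL qtL esc (cs.length + 1) (cs.length + 1 + 1) (k+1) n (by omega) (by omega)

theorem pvFirstIdx_none (t : List Char) : ∀ (cs : List Char), pvFirstIdx cs t = none →
    ∀ k (hk : k < cs.length), [cs[k]] ≠ t := by
  intro cs
  induction cs with
  | nil => intro _ k hk; simp at hk
  | cons c rest ih =>
    intro h k hk
    simp only [pvFirstIdx] at h
    split at h
    · simp at h
    · rename_i hc
      match k with
      | 0 => simpa using hc
      | k + 1 =>
        simp only [Option.map_eq_none_iff] at h
        exact ih h k (by simpa using hk)

theorem pvFirstIdx_some (t : List Char) : ∀ (cs : List Char) (j : Nat), pvFirstIdx cs t = some j →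
    ∃ hl : j < cs.length, [cs[j]] = t ∧ ∀ k (hk : k < cs.length), k < j → [cs[k]] ≠ t := by
  intro cs
  induction cs with
  | nil => intro j h; simp [pvFirstIdx] at h
  | cons c rest ih =>
    intro j h
    simp only [pvFirstIdx] at h
    split at h
    · rename_i hc
      simp at h
      subst h
      exact ⟨by simp, by simpa using hc, by intro k hk hkj; omega⟩
    · rename_i hc
      simp only [Option.map_eq_some_iff] at h
      obtain ⟨a, ha, hj⟩ := h
      obtain ⟨hl, hhit, hbef⟩ := ih a ha
      subst hj
      refine ⟨by simpa using hl, by simpa using hhit, ?_⟩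
      intro k hk hkj
      match k with
      | 0 => simpa using hc
      | k + 1 => exact hbef k (by simpa using hk) (by omega)

theorem pvFind1_none (cs t : List Char) (i : Nat) (h : pvFind1 cs t i = none) :
    ∀ k (hk : k < cs.length), i ≤ k → [cs[k]] ≠ t := by
  intro k hk hik
  simp only [pvFind1, Option.map_eq_none_iff] at h
  have h2 := pvFirstIdx_none t (cs.drop i) h (k - i) (by simp; omega)
  rw [List.getElem_drop] at h2
  have he : i + (k - i) = k := by omega
  simp only [he] at h2
  exact h2

theorem pvFind1_some (cs t : List Char) (i j : Nat) (h : pvFind1 cs t i = some j) :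
    ∃ hl : j < cs.length, i ≤ j ∧ [cs[j]] = t ∧ ∀ k (hk : k < cs.length), i ≤ k → k < j → [cs[k]] ≠ t := by
  simp only [pvFind1, Option.map_eq_some_iff] at h
  obtain ⟨a, ha, hj⟩ := h
  obtain ⟨hl, hhit, hbef⟩ := pvFirstIdx_some t _ a ha
  subst hj
  have hlen : i + a < cs.length := by simp at hl; omega
  rw [List.getElem_drop] at hhit
  refine ⟨hlen, by omega, hhit, ?_⟩
  intro k hk hik hkj
  have h2 := hbef (k - i) (by simp; omega) (by omega)
  rw [List.getElem_drop] at h2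
  have he : i + (k - i) = k := by omega
  simp only [he] at h2
  exact h2

theorem pvFind1_big (cs t : List Char) (i : Nat) (h : cs.length ≤ i) : pvFind1 cs t i = none := by
  simp [pvFind1, List.drop_eq_nil_of_le h, pvFirstIdx]

theorem pvFind1_self (cs t : List Char) (i : Nat) (hl : i < cs.length) (h : [cs[i]] = t) :
    pvFind1 cs t i = some i := by
  rw [pvFind1, List.drop_eq_getElem_cons hl]
  simp [pvFirstIdx, h]

theorem pvFind1_step (cs t : List Char) (i : Nat) (hl : i < cs.length) (h : [cs[i]] ≠ t) :
    pvFind1 cs t i = pvFind1 cs t (i + 1) := by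
  simp only [pvFind1]
  rw [List.drop_eq_getElem_cons hl]
  simp only [pvFirstIdx, if_neg h, Option.map_map]
  cases pvFirstIdx (cs.drop (i+1)) t <;> simp [Function.comp] <;> omega

-- step lemmas for pvClose
theorem pvClose_big (cs qtL : List Char) (esc : Bool) (k : Nat) (h : cs.length ≤ k) :
    pvClose cs qtL esc k = none := by
  simp [pvClose, pvCloseF, pvFind1_big cs qtL k h]

theorem pvClose_hit (cs qtL : List Char) (esc : Bool) (k : Nat) (hl : k < cs.length)
    (h : [cs[k]] = qtL) (hne : ¬ (esc = true ∧ cs[k-1]? = some '\\')) :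
    pvClose cs qtL esc k = some k := by
  simp only [pvClose, pvCloseF, pvFind1_self cs qtL k hl h]
  rw [if_neg hne]

theorem pvClose_hit_skip (cs qtL : List Char) (esc : Bool) (k : Nat) (hl : k < cs.length)
    (h : [cs[k]] = qtL) (he : esc = true ∧ cs[k-1]? = some '\\') :
    pvClose cs qtL esc k = pvClose cs qtL esc (k + 1) := by
  simp only [pvClose, pvCloseF, pvFind1_self cs qtL k hl h]
  rw [if_pos he]
  exact pvCloseF_fuel cs qtL esc cs.length (cs.length + 1) (k+1) (by omega) (by omega)

theorem pvClose_miss (cs qtL : List Char) (esc : Bool) (k : Nat) (hl : k < cs.length)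
    (h : [cs[k]] ≠ qtL) :
    pvClose cs qtL esc k = pvClose cs qtL esc (k + 1) := by
  simp only [pvClose, pvCloseF, pvFind1_step cs qtL k hl h]

-- A's loop ignores a stretch of characters that match neither the quote nor the char
theorem pvSkipOut (chL qtL : List Char) (resp : Bool) (cs : List Char) :
    ∀ (d i : Nat) (n : Int), i + d ≤ cs.length →
    (∀ k (hk : k < cs.length), i ≤ k → k < i + d → [cs[k]] ≠ qtL ∧ [cs[k]] ≠ chL) →
    pvALoop chL qtL resp (cs.drop i) (i : Int) false 0 n =
      pvALoop chL qtL resp (cs.drop (i + d)) ((i + d : Nat) : Int) false 0 n := by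
  intro d
  induction d with
  | zero => intro i n _ _; simp
  | succ d ih =>
    intro i n hlen hno
    have hi : i < cs.length := by omega
    have hc := hno i hi (le_refl i) (by omega)
    rw [List.drop_eq_getElem_cons hi]
    rw [show pvALoop chL qtL resp (cs[i] :: cs.drop (i+1)) (i:Int) false 0 n =
        pvALoop chL qtL resp (cs.drop (i+1)) ((i:Int)+1) false (pvADec 0) n by
      simp only [pvALoop]
      rw [if_neg (by simp [hc.1]), if_neg (by simp), if_neg (by simp [hc.2])]]
    have : ((i:Int)+1) = (((i+1:Nat)):Int) := by push_cast; ring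
    rw [this, show pvADec 0 = 0 from rfl]
    rw [ih (i+1) n (by omega) (fun k hk h1 h2 => hno k hk (by omega) (by omega))]
    congr 2 <;> omega

-- A's in-string scan equals: find the first unescaped closing quote, then resume outside.
-- invariant: iq ∈ {0,1}; with escapes active, iq = 1 exactly when the previous char is '\'.
theorem pvInLoop (chL qtL : List Char) (resp : Bool) (cs : List Char) (esc : Bool)
    (hesc : esc = (resp && decide (qtL ≠ ['\\']))) :
    ∀ (m k : Nat) (v : Int) (n : Int), cs.length - k ≤ m →
    (v = 0 ∨ v = 1) →
    (esc = true → (v = 1 ↔ (1 ≤ k ∧ cs[k-1]? = some '\\'))) →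
    (esc = false → v = 0) →
    pvALoop chL qtL resp (cs.drop k) (k : Int) true v n =
      (match pvClose cs qtL esc k with
       | none => -1
       | some j => pvALoop chL qtL resp (cs.drop (j+1)) ((j:Int)+1) false 0 n) := by
  intro m
  induction m with
  | zero =>
    intro k v n hm _ _ _
    have hk : cs.length ≤ k := by omega
    rw [List.drop_eq_nil_of_le hk, pvClose_big cs qtL esc k hk]
    simp [pvALoop]
  | succ m ih =>
    intro k v n hm hv hinv1 hinv0
    by_cases hk : k < cs.length
    · rw [List.drop_eq_getElem_cons hk]
      by_cases h1 : [cs[k]] = qtL ∧ v = 0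
      · -- branch 1: an unescaped closing quote; exit the string
        have hne : ¬ (esc = true ∧ cs[k-1]? = some '\\') := by
          rintro ⟨he, hprev⟩
          have hqt : qtL ≠ ['\\'] := by
            rw [hesc] at he; simp at he; exact he.2
          rcases Nat.eq_zero_or_pos k with hk0 | hk1
          · subst hk0
            simp only [Nat.zero_sub, List.getElem?_eq_getElem hk, Option.some.injEq] at hprev
            exact hqt (by rw [← h1.1, hprev])
          · have := (hinv1 he).mpr ⟨by omega, hprev⟩
            omega
        rw [pvClose_hit cs qtL esc k hk h1.1 hne]
        have hstep : pvALoop chL qtL resp (cs[k] :: cs.drop (k+1)) (k:Int) true v n =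
            pvALoop chL qtL resp (cs.drop (k+1)) ((k:Int)+1) false 0 n := by
          simp only [pvALoop]
          rw [if_pos h1, h1.2]
          norm_num [pvADec]
        rw [hstep]
      · by_cases h2 : cs[k] = '\\' ∧ resp = true
        · -- branch 2: a backslash inside the string arms the escape
          have hescT : esc = true := by
            by_contra hF
            have hv0 := hinv0 (by simpa using hF)
            have hqt : qtL = ['\\'] := by
              rw [hesc] at hF; simp [h2.2] at hF; exact hF
            exact h1 ⟨by rw [hqt, h2.1], hv0⟩
          have hqt : qtL ≠ ['\\'] := by
            rw [hesc] at hescT; simp at hescT; exact hescT.2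
          have hmiss : [cs[k]] ≠ qtL := by
            intro hEq; exact hqt (by rw [← hEq, h2.1])
          rw [pvClose_miss cs qtL esc k hk hmiss]
          have hstep : pvALoop chL qtL resp (cs[k] :: cs.drop (k+1)) (k:Int) true v n =
              pvALoop chL qtL resp (cs.drop (k+1)) ((k:Int)+1) true 1 n := by
            simp only [pvALoop]
            rw [if_neg h1, if_pos (show cs[k] = '\\' ∧ resp = true ∧ True from ⟨h2.1, h2.2, trivial⟩)]
            norm_num [pvADec]
          rw [hstep, show ((k:Int)+1) = (((k+1:Nat)):Int) by push_cast; ring]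
          exact ih (k+1) 1 n (by omega) (Or.inr rfl)
            (fun _ => by simp [List.getElem?_eq_getElem hk, h2.1])
            (fun hF => by rw [hF] at hescT; exact absurd hescT (by simp))
        · -- plain character inside the string
          have hstep : pvALoop chL qtL resp (cs[k] :: cs.drop (k+1)) (k:Int) true v n =
              pvALoop chL qtL resp (cs.drop (k+1)) ((k:Int)+1) true (pvADec v) n := by
            simp only [pvALoop]
            rw [if_neg h1,
              if_neg (show ¬ (cs[k] = '\\' ∧ resp = true ∧ True) from fun hx => h2 ⟨hx.1, hx.2.1⟩),
              if_neg (show ¬ ([cs[k]] = chL ∧ true = false) from fun hx => by simpa using hx.2)]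
          have hv0 : pvADec v = 0 := by rcases hv with h | h <;> simp [pvADec, h]
          have hclose : pvClose cs qtL esc k = pvClose cs qtL esc (k+1) := by
            by_cases hqm : [cs[k]] = qtL
            · have hv1 : v = 1 := by
                rcases hv with h | h
                · exact absurd ⟨hqm, h⟩ h1
                · exact h
              have hescT : esc = true := by
                by_contra hF
                exact absurd (hinv0 (by simpa using hF)) (by omega)
              obtain ⟨_, hprev⟩ := (hinv1 hescT).mp hv1
              exact pvClose_hit_skip cs qtL esc k hk hqm ⟨hescT, hprev⟩
            · exact pvClose_miss cs qtL esc k hk hqm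
          rw [hstep, hclose, hv0, show ((k:Int)+1) = (((k+1:Nat)):Int) by push_cast; ring]
          refine ih (k+1) 0 n (by omega) (Or.inl rfl) (fun he => ?_) (fun _ => rfl)
          constructor
          · intro h; exact absurd h (by norm_num)
          · rintro ⟨_, hprev⟩
            simp only [Nat.add_sub_cancel, List.getElem?_eq_getElem hk, Option.some.injEq] at hprev
            have hresp : resp = true := by
              rw [hesc] at he; simp at he; exact he.1
            exact absurd ⟨hprev, hresp⟩ h2
    · rw [List.drop_eq_nil_of_le (by omega), pvClose_big cs qtL esc k (by omega)]
      simp [pvALoop]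

-- entering a quote at position qj: A scans the quoted region; B skips it via pvClose
theorem pvQuoteStep (chL qtL : List Char) (resp : Bool) (cs : List Char) (i qj : Nat) (n : Int)
    (hq : pvFind1 cs qtL i = some qj)
    (hnoc : ∀ k (hk : k < cs.length), i ≤ k → k < qj → [cs[k]] ≠ chL) :
    pvALoop chL qtL resp (cs.drop i) (i : Int) false 0 n =
      (match pvClose cs qtL (resp && decide (qtL ≠ ['\\'])) (qj+1) with
       | none => -1
       | some k => pvALoop chL qtL resp (cs.drop (k+1)) ((k:Int)+1) false 0 n) := by
  obtain ⟨hql, hqi, hqhit, hqbef⟩ := pvFind1_some cs qtL i qj hq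
  have hA := pvSkipOut chL qtL resp cs (qj - i) i n (by omega)
    (fun k hk h1 h2 => ⟨hqbef k hk h1 (by omega), hnoc k hk h1 (by omega)⟩)
  rw [show i + (qj - i) = qj by omega] at hA
  rw [hA, List.drop_eq_getElem_cons hql]
  have hstep : pvALoop chL qtL resp (cs[qj] :: cs.drop (qj+1)) (qj:Int) false 0 n =
      pvALoop chL qtL resp (cs.drop (qj+1)) ((qj:Int)+1) true 0 n := by
    simp only [pvALoop]
    rw [if_pos (show [cs[qj]] = qtL ∧ True from ⟨hqhit, trivial⟩)]
    norm_num [pvADec]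
  rw [hstep, show ((qj:Int)+1) = (((qj+1:Nat)):Int) by push_cast; ring]
  exact pvInLoop chL qtL resp cs (resp && decide (qtL ≠ ['\\'])) rfl cs.length (qj+1) 0 n
    (by omega) (Or.inl rfl)
    (fun he => by
      constructor
      · intro h; exact absurd h (by norm_num)
      · rintro ⟨_, hp⟩
        simp only [Nat.add_sub_cancel, List.getElem?_eq_getElem hql, Option.some.injEq] at hp
        have hqt : qtL ≠ ['\\'] := by simp at he; exact he.2
        exact absurd (show qtL = ['\\'] by rw [← hqhit, hp]) hqt)
    (fun _ => rfl)

-- main loop correspondence: A's scan from index i (outside a string) is B's jump loop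
theorem pvMain (chL qtL : List Char) (resp : Bool) (cs : List Char) :
    ∀ (m i : Nat) (n : Int), cs.length - i ≤ m → 0 ≤ n →
    pvALoop chL qtL resp (cs.drop i) (i : Int) false 0 n =
      pvBOuter cs chL qtL (resp && decide (qtL ≠ ['\\'])) i n := by
  intro m
  induction m with
  | zero =>
    intro i n hm hn
    have hi : cs.length ≤ i := by omega
    have hcb := pvFind1_big cs chL i hi
    have hqb := pvFind1_big cs qtL i hi
    rw [List.drop_eq_nil_of_le hi]
    conv_rhs => rw [pvBOuter_unfold]
    split
    · rename_i heqc heqq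
      simp [hcb] at heqc
    · rename_i heqc heqq
      simp [hcb] at heqc
    · rename_i heqc heqq
      simp [hqb] at heqq
    · simp [pvALoop]
  | succ m ih =>
    intro i n hm hn
    rcases hc : pvFind1 cs chL i with _ | cj <;> rcases hq : pvFind1 cs qtL i with _ | qj
    · -- neither the char nor a quote occurs from i on: A drains the string, B returns -1
      have hnoq := pvFind1_none cs qtL i hq
      have hnoc := pvFind1_none cs chL i hc
      have hA : pvALoop chL qtL resp (cs.drop i) (i : Int) false 0 n = -1 := by
        by_cases hi : i ≤ cs.length
        · have hA := pvSkipOut chL qtL resp cs (cs.length - i) i n (by omega)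
            (fun k hk h1 h2 => ⟨hnoq k hk h1, hnoc k hk h1⟩)
          rw [show i + (cs.length - i) = cs.length by omega] at hA
          rw [hA, List.drop_eq_nil_of_le (le_refl _)]
          simp [pvALoop]
        · rw [List.drop_eq_nil_of_le (by omega)]
          simp [pvALoop]
      rw [hA]
      conv_rhs => rw [pvBOuter_unfold]
      split
      · rename_i heqc heqq
        simp [hc] at heqc
      · rename_i heqc heqq
        simp [hc] at heqc
      · rename_i heqc heqq
        simp [hq] at heqq
      · rfl
    · -- a quote comes first (no char at all)
      have hnoc := pvFind1_none cs chL i hc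
      rw [pvQuoteStep chL qtL resp cs i qj n hq (fun k hk h1 _ => hnoc k hk h1)]
      rcases hcl : pvClose cs qtL (resp && decide (qtL ≠ ['\\'])) (qj+1) with _ | k <;>
        simp only [ne_eq, decide_not] at hcl
      · show (-1 : Int) = _
        conv_rhs => rw [pvBOuter_unfold]
        split
        · rename_i heqc heqq
          simp [hc] at heqc
        · rename_i heqc heqq
          simp [hc] at heqc
        · rename_i qj' heqc heqq
          rw [hq] at heqq; injection heqq with h; subst h
          split
          · rfl
          · rename_i k' heqk
            simp [hcl] at heqk
        · rename_i heqc heqq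
          simp [hq] at heqq
      · have hb1 := pvFind1_bounds cs qtL i qj hq
        have hb2 := pvClose_bounds cs qtL _ (qj+1) k hcl
        show pvALoop chL qtL resp (cs.drop (k+1)) ((k:Int)+1) false 0 n = _
        rw [show ((k:Int)+1) = (((k+1:Nat)):Int) by push_cast; ring,
          ih (k+1) n (by omega) hn]
        conv_rhs => rw [pvBOuter_unfold]
        split
        · rename_i heqc heqq
          simp [hc] at heqc
        · rename_i heqc heqq
          simp [hc] at heqc
        · rename_i qj' heqc heqq
          rw [hq] at heqq; injection heqq with h; subst h
          split
          · rename_i heqk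
            simp [hcl] at heqk
          · rename_i k' heqk
            simp [hcl] at heqk
            subst heqk
            rfl
        · rename_i heqc heqq
          simp [hq] at heqq
    · -- the char comes first (no quote at all)
      obtain ⟨hcl, hci, hchit, hcbef⟩ := pvFind1_some cs chL i cj hc
      have hnoq := pvFind1_none cs qtL i hq
      have hA := pvSkipOut chL qtL resp cs (cj - i) i n (by omega)
        (fun k hk h1 h2 => ⟨hnoq k hk h1, hcbef k hk h1 (by omega)⟩)
      rw [show i + (cj - i) = cj by omega] at hA
      rw [hA, List.drop_eq_getElem_cons hcl]
      have hstep0 : pvALoop chL qtL resp (cs[cj] :: cs.drop (cj+1)) (cj:Int) false 0 n =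
          if n ≠ 0 then pvALoop chL qtL resp (cs.drop (cj+1)) ((cj:Int)+1) false 0 (n - 1) else (cj:Int) := by
        simp only [pvALoop]
        rw [if_neg (show ¬ ([cs[cj]] = qtL ∧ True) from fun hx => hnoq cj hcl hci hx.1),
          if_neg (show ¬ (cs[cj] = '\\' ∧ resp = true ∧ false = true) from fun hx => by simpa using hx.2.2),
          if_pos (show [cs[cj]] = chL ∧ True from ⟨hchit, trivial⟩)]
        norm_num [pvADec]
      rw [hstep0]
      by_cases hn0 : n = 0
      · rw [if_neg (by omega)]
        conv_rhs => rw [pvBOuter_unfold]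
        split
        · rename_i cj' heqc heqq
          rw [hc] at heqc; injection heqc with h; subst h
          rw [if_pos hn0]
        · rename_i heqc heqq
          simp [hq] at heqq
        · rename_i heqc heqq
          simp [hc] at heqc
        · rename_i heqc heqq
          simp [hc] at heqc
      · rw [if_pos (by omega), show ((cj:Int)+1) = (((cj+1:Nat)):Int) by push_cast; ring,
          ih (cj+1) (n-1) (by omega) (by omega)]
        conv_rhs => rw [pvBOuter_unfold]
        split
        · rename_i cj' heqc heqq
          rw [hc] at heqc; injection heqc with h; subst h
          rw [if_neg hn0]
        · rename_i heqc heqq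
          simp [hq] at heqq
        · rename_i heqc heqq
          simp [hc] at heqc
        · rename_i heqc heqq
          simp [hc] at heqc
    · -- both occur: the earlier one wins; on a tie the quote wins (A checks it first)
      obtain ⟨hql', hqi', hqhit', hqbef'⟩ := pvFind1_some cs qtL i qj hq
      by_cases hlt : cj < qj
      · obtain ⟨hcl, hci, hchit, hcbef⟩ := pvFind1_some cs chL i cj hc
        have hA := pvSkipOut chL qtL resp cs (cj - i) i n (by omega)
          (fun k hk h1 h2 => ⟨hqbef' k hk h1 (by omega), hcbef k hk h1 (by omega)⟩)
        rw [show i + (cj - i) = cj by omega] at hA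
        rw [hA, List.drop_eq_getElem_cons hcl]
        have hstep0 : pvALoop chL qtL resp (cs[cj] :: cs.drop (cj+1)) (cj:Int) false 0 n =
            if n ≠ 0 then pvALoop chL qtL resp (cs.drop (cj+1)) ((cj:Int)+1) false 0 (n - 1) else (cj:Int) := by
          simp only [pvALoop]
          rw [if_neg (show ¬ ([cs[cj]] = qtL ∧ True) from fun hx => hqbef' cj hcl hci hlt hx.1),
            if_neg (show ¬ (cs[cj] = '\\' ∧ resp = true ∧ false = true) from fun hx => by simpa using hx.2.2),
            if_pos (show [cs[cj]] = chL ∧ True from ⟨hchit, trivial⟩)]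
          norm_num [pvADec]
        rw [hstep0]
        by_cases hn0 : n = 0
        · rw [if_neg (by omega)]
          conv_rhs => rw [pvBOuter_unfold]
          split
          · rename_i heqc heqq
            simp [hq] at heqq
          · rename_i cj' qj' heqc heqq
            rw [hc] at heqc; rw [hq] at heqq
            injection heqc with h1; injection heqq with h2
            subst h1; subst h2
            rw [if_pos hlt, if_pos hn0]
          · rename_i heqc heqq
            simp [hc] at heqc
          · rename_i heqc heqq
            simp [hc] at heqc
        · rw [if_pos (by omega), show ((cj:Int)+1) = (((cj+1:Nat)):Int) by push_cast; ring,
            ih (cj+1) (n-1) (by omega) (by omega)]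
          conv_rhs => rw [pvBOuter_unfold]
          split
          · rename_i heqc heqq
            simp [hq] at heqq
          · rename_i cj' qj' heqc heqq
            rw [hc] at heqc; rw [hq] at heqq
            injection heqc with h1; injection heqq with h2
            subst h1; subst h2
            rw [if_pos hlt, if_neg hn0]
          · rename_i heqc heqq
            simp [hc] at heqc
          · rename_i heqc heqq
            simp [hc] at heqc
      · obtain ⟨hcl, hci, hchit, hcbef⟩ := pvFind1_some cs chL i cj hc
        rw [pvQuoteStep chL qtL resp cs i qj n hq
          (fun k hk h1 h2 => hcbef k hk h1 (by omega))]
        rcases hcl2 : pvClose cs qtL (resp && decide (qtL ≠ ['\\'])) (qj+1) with _ | k <;>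
          simp only [ne_eq, decide_not] at hcl2
        · show (-1 : Int) = _
          conv_rhs => rw [pvBOuter_unfold]
          split
          · rename_i heqc heqq
            simp [hq] at heqq
          · rename_i cj' qj' heqc heqq
            rw [hc] at heqc; rw [hq] at heqq
            injection heqc with h1; injection heqq with h2
            subst h1; subst h2
            rw [if_neg hlt]
            split
            · rfl
            · rename_i k' heqk
              simp [hcl2] at heqk
          · rename_i heqc heqq
            simp [hc] at heqc
          · rename_i heqc heqq
            simp [hc] at heqc
        · have hb2 := pvClose_bounds cs qtL _ (qj+1) k hcl2
          show pvALoop chL qtL resp (cs.drop (k+1)) ((k:Int)+1) false 0 n = _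
          rw [show ((k:Int)+1) = (((k+1:Nat)):Int) by push_cast; ring,
            ih (k+1) n (by omega) hn]
          conv_rhs => rw [pvBOuter_unfold]
          split
          · rename_i heqc heqq
            simp [hq] at heqq
          · rename_i cj' qj' heqc heqq
            rw [hc] at heqc; rw [hq] at heqq
            injection heqc with h1; injection heqq with h2
            subst h1; subst h2
            rw [if_neg hlt]
            split
            · rename_i heqk
              simp [hcl2] at heqk
            · rename_i k' heqk
              simp [hcl2] at heqk
              subst heqk
              rfl
          · rename_i heqc heqq
            simp [hc] at heqc
          · rename_i heqc heqq
            simp [hc] at heqc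

-- if no character of the string matches `char`, A's loop returns -1
theorem pvALoop_no_char (chL qtL : List Char) (resp : Bool) : ∀ (cs : List Char),
    (∀ c ∈ cs, [c] ≠ chL) → ∀ (cn : Int) (inStr : Bool) (iq cc : Int),
    pvALoop chL qtL resp cs cn inStr iq cc = -1 := by
  intro cs
  induction cs with
  | nil => intro _ _ _ _ _; simp [pvALoop]
  | cons c rest ih =>
    intro h cn inStr iq cc
    have hc : [c] ≠ chL := h c (by simp)
    have hrest : ∀ x ∈ rest, [x] ≠ chL := fun x hx => h x (by simp [hx])
    simp only [pvALoop]
    split_ifs with h1 h2 h3 h4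
    · exact ih hrest _ _ _ _
    · exact ih hrest _ _ _ _
    · exact absurd h3.1 hc
    · exact absurd h3.1 hc
    · exact ih hrest _ _ _ _

-- ===== VERDICT (by name: the statement is the Claim_ definition above) =====
theorem get_char_not_in_str_spec : Claim_equal_get_char_not_in_str := by
  intro string char quote_char nth_char_to_get respect_escapes _
  unfold Spec_get_char_not_in_str get_char_not_in_str get_char_not_in_str_alt
  set n : Int := if nth_char_to_get - 1 < 0 then 0 else nth_char_to_get - 1 with hn
  have hn0 : 0 ≤ n := by rw [hn]; split <;> omega
  have hmain := pvMain char.toList quote_char.toList respect_escapes string.toList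
    string.toList.length 0 n (by omega) hn0
  simp only [List.drop_zero, Int.natCast_zero] at hmain
  by_cases hin : PySem.Str.isIn char string = true
  · rw [if_neg (not_not_intro hin)]
    exact hmain
  · rw [if_pos hin]
    rw [PySem.Str.isIn_eq] at hin
    have hnomem : ∀ c ∈ string.toList, [c] ≠ char.toList := by
      intro c hc hEq
      obtain ⟨s, t, hst⟩ := List.append_of_mem hc
      exact hin ((PySem.Chars.isIn_iff_infix _ _).mpr (hEq ▸ ⟨s, t, by simp [hst]⟩))
    rw [← hmain, pvALoop_no_char _ _ _ _ hnomem]
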